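-- pv_equiv track=rewrite | github.com/rbarden3/machine_learning | AI/N_Queens-Genetic.py | convert_board_to2D
-- ===== SOURCE A (Python) =====
-- def convert_board_to2D(board): # used to convert list of queen positions to a 2d list with spaces and "Q"s
--     board_size = len(board)
--     sideways_board_2d = [] # Grid will initially be sizeways
--     board_2d = []
--
--     for _, val in enumerate(board): # creates transposed 2d_grid
--         col = []
--         for row in range(board_size):
--             if (row+1 == val):
--                 col.append('Q')
--             else:
--                 col.append(' ')
--         sideways_board_2d.append(col)
--
--     for r in range(board_size): #transpose grid
--         row = []
--         for c in range(board_size):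
--             row.append(sideways_board_2d[c][r])
--         board_2d.append(row)
--
--     return board_2d
-- ===== SOURCE B (Python) =====
-- def convert_board_to2D(board):
--     # Build the grid row by row directly: cell (r, c) is 'Q' iff board[c] == r + 1.
--     n = len(board)
--     return [['Q' if v == r + 1 else ' ' for v in board] for r in range(n)]
-- ===== Notes on version B (the rewrite author's own statement) =====
-- stated objective: simpler
-- what changed: Builds the grid row-first in one comprehension (cell is 'Q' iff board[c] == r+1), dropping A's transposed intermediate grid and the whole second transpose loop.
import Mathlib
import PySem

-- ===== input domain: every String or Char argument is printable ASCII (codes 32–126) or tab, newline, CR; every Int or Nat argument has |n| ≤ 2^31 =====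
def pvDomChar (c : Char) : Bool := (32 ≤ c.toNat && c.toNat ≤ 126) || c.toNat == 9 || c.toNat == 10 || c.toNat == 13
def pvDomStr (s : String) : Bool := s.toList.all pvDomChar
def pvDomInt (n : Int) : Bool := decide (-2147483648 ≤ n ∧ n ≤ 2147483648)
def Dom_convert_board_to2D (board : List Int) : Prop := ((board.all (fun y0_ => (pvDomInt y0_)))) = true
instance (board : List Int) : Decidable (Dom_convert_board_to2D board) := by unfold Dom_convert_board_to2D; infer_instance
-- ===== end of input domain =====

-- B builds the grid row-first in one pass (cell (r,c) = "Q" iff board[c] = r+1),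
-- dropping A's transposed intermediate grid and its second transpose loop (objective: simpler).


-- ===== PORT A =====
-- literal port: two foldl loops build the transposed grid, two more transpose it;
-- the indexings sideways_board_2d[c][r] are always in range, ported with pyGetD (defaults never read)
def convert_board_to2D (board : List Int) : List (List String) :=
  let board_size : Int := (board.length : Int)
  let sideways_board_2d : List (List String) :=
    board.foldl (fun acc val =>
      acc ++ [(PySem.List.pyRange 0 board_size 1).foldl
        (fun col row => col ++ [if row + 1 == val then "Q" else " "]) []]) []
  (PySem.List.pyRange 0 board_size 1).foldl (fun board_2d r =>
    board_2d ++ [(PySem.List.pyRange 0 board_size 1).foldl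
      (fun rowAcc c =>
        rowAcc ++ [PySem.List.pyGetD (PySem.List.pyGetD sideways_board_2d c []) r " "]) []]) []

-- ===== PORT B =====
-- literal port of Source B: one row-first comprehension
def convert_board_to2D_alt (board : List Int) : List (List String) :=
  (PySem.List.pyRange 0 (board.length : Int) 1).map (fun r =>
    board.map (fun v => if v == r + 1 then "Q" else " "))

-- ===== PRECONDITION & SPEC =====
def Spec_convert_board_to2D (board : List Int) (out : List (List String)) : Prop := out = convert_board_to2D_alt board
instance (board : List Int) (out : List (List String)) : Decidable (Spec_convert_board_to2D board out) := by unfold Spec_convert_board_to2D; infer_instance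

-- ===== CLAIM (what is proved, stated in full; the proofs are below) =====
def Claim_equal_convert_board_to2D : Prop := ∀ (board : List Int), Dom_convert_board_to2D board → Spec_convert_board_to2D board (convert_board_to2D board)

-- ===== LEMMAS AND PROOFS =====

theorem conv_eq (board : List Int) :
    convert_board_to2D board = convert_board_to2D_alt board := by
  unfold convert_board_to2D convert_board_to2D_alt
  simp only [PySem.List.foldl_append_singleton_eq_map, List.nil_append]
  apply List.map_congr_left
  intro r hr
  obtain ⟨hr0, hrn⟩ := (PySem.List.mem_pyRange_one).mp hr
  conv_rhs => rw [← PySem.List.map_pyGetD_pyRange_zero' board 0, List.map_map]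
  apply List.map_congr_left
  intro c hc
  obtain ⟨hc0, hcn⟩ := (PySem.List.mem_pyRange_one).mp hc
  rw [PySem.List.pyGetD_eq_getElem (List.map _ board) [] hc0 (by simpa using hcn)]
  simp only [List.getElem_map, Function.comp_apply]
  rw [PySem.List.pyGetD_eq_getElem board 0 hc0 hcn,
      PySem.List.pyGetD_map_pyRange_of_nonneg _ _ _ _ hr0 hrn]
  by_cases h : r + 1 = board[c.toNat]
  · simp [h]
  · have h' : ¬ board[c.toNat] = r + 1 := fun e => h e.symm
    simp [h, h']

-- ===== VERDICT (by name: the statement is the Claim_ definition above) =====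
theorem convert_board_to2D_spec : Claim_equal_convert_board_to2D := by
  intro board _
  show convert_board_to2D board = convert_board_to2D_alt board
  exact conv_eq board
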